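-- pv_equiv track=rewrite | github.com/snuarrow/pubgStatz | gradient_factory.py | _cutTail
-- ===== SOURCE A (Python) =====
-- def _cutTail(playerIntervals: list):
--     def getLastPositionIndex(playerIntervals: list):
--         playerIntervals.reverse()
--         for i, p in enumerate(playerIntervals):
--             if p:
--                 playerIntervals.reverse()
--                 return len(playerIntervals) - i
--         playerIntervals.reverse()
--         return 0
--
--     i = getLastPositionIndex(playerIntervals)
--     return playerIntervals[:i]
-- ===== SOURCE B (Python) =====
-- def _cutTail(playerIntervals: list):
--     i = len(playerIntervals)
--     while i > 0 and not playerIntervals[i - 1]: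
--         i -= 1
--     return playerIntervals[:i]
-- ===== Notes on version B (the rewrite author's own statement) =====
-- stated objective: simpler
-- what changed: Replaces the nested helper that reverses the list, scans forward for the first truthy element and reverses back, with a single backward-shrinking index and one slice.
import Mathlib
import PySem

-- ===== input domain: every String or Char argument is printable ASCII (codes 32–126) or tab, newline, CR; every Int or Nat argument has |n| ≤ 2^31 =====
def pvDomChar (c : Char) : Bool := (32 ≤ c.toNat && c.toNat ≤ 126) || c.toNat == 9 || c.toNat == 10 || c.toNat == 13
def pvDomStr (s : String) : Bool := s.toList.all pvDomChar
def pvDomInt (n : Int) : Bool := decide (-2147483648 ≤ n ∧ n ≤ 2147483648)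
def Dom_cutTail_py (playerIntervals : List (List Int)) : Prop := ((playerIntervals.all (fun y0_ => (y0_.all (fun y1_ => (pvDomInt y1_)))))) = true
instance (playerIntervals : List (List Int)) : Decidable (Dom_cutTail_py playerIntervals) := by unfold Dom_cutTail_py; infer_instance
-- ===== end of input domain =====

-- B replaces A's reverse/forward-scan/reverse helper with a single backward-shrinking
-- index (simpler decomposition). A's two in-place reverses cancel, so neither version
-- observably mutates its argument; equivalence is about the return value.

-- ===== PORT A =====
-- helper `getLastPositionIndex`: after `playerIntervals.reverse()` it enumerates the
-- reversed list; first truthy p gives len - i, otherwise 0 (reverses cancel, so we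
-- scan `playerIntervals.reverse` directly and the argument is unchanged — exact).
def pvGLPILoop (n : Nat) : List (List Int) → Nat → Int
  | [], _ => 0
  | p :: rest, i => if p.isEmpty then pvGLPILoop n rest (i + 1) else (n : Int) - (i : Int)

def cutTail_py (playerIntervals : List (List Int)) : List (List Int) :=
  let i := pvGLPILoop playerIntervals.length playerIntervals.reverse 0
  -- playerIntervals[:i]; here i ≥ 0 always, so Python's slice is exactly `take`
  playerIntervals.take i.toNat

-- ===== PORT B =====
-- `while i > 0 and not playerIntervals[i-1]: i -= 1` as recursion on i;
-- playerIntervals[i-1] is always in range (0 < i ≤ len), so `getD` is exact.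
def pvBIdx (xs : List (List Int)) : Nat → Nat
  | 0 => 0
  | i + 1 => if (xs.getD i []).isEmpty then pvBIdx xs i else i + 1

def cutTail_py_alt (playerIntervals : List (List Int)) : List (List Int) :=
  playerIntervals.take (pvBIdx playerIntervals playerIntervals.length)

-- ===== PRECONDITION & SPEC =====
def Spec_cutTail_py (playerIntervals : List (List Int)) (out : List (List Int)) : Prop := out = cutTail_py_alt playerIntervals
instance (playerIntervals : List (List Int)) (out : List (List Int)) : Decidable (Spec_cutTail_py playerIntervals out) := by unfold Spec_cutTail_py; infer_instance

-- ===== CLAIM (what is proved, stated in full; the proofs are below) =====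
def Claim_equal_cutTail_py : Prop := ∀ (playerIntervals : List (List Int)), Dom_cutTail_py playerIntervals → Spec_cutTail_py playerIntervals (cutTail_py playerIntervals)

-- ===== LEMMAS AND PROOFS =====

-- A's scan over the reversed list: 0 if everything is empty, else n - (j + length of
-- the leading empty prefix).
theorem pvGLPILoop_spec (ys : List (List Int)) : ∀ (n j : Nat),
    pvGLPILoop n ys j =
      if ys.all (·.isEmpty) then 0
      else (n : Int) - ((j : Int) + ((ys.takeWhile (·.isEmpty)).length : Int)) := by
  induction ys with
  | nil => intro n j; simp [pvGLPILoop]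
  | cons p rest ih =>
    intro n j
    by_cases hp : p.isEmpty
    · simp [pvGLPILoop, hp, ih n (j + 1), List.all_cons]
      split_ifs
      · rfl
      · push_cast; ring
    · simp [pvGLPILoop, hp, List.takeWhile_cons, List.all_cons]

-- B's descending loop: i minus the length of the empty suffix of xs.take i.
theorem pvBIdx_spec (xs : List (List Int)) : ∀ (i : Nat), i ≤ xs.length →
    pvBIdx xs i = i - (((xs.take i).reverse.takeWhile (·.isEmpty)).length) := by
  intro i
  induction i with
  | zero => intro _; simp [pvBIdx]
  | succ i ih =>
    intro h
    have hi : i < xs.length := by omega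
    have htake : (xs.take (i + 1)).reverse = xs[i] :: (xs.take i).reverse := by
      rw [List.take_add_one, List.getElem?_eq_getElem hi]
      simp
    have hg : xs.getD i [] = xs[i] := by
      simp [List.getD, List.getElem?_eq_getElem hi]
    have hle : (((xs.take i).reverse.takeWhile (·.isEmpty)).length) ≤ i := by
      have h1 := (List.takeWhile_sublist (p := fun l : List Int => l.isEmpty)
        (l := (xs.take i).reverse)).length_le
      simpa [Nat.min_eq_left (le_of_lt hi)] using h1
    rw [pvBIdx, hg, htake, List.takeWhile_cons]
    by_cases he : (xs[i] : List Int).isEmpty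
    · rw [if_pos he, if_pos he, ih (le_of_lt hi)]
      simp only [List.length_cons]
      omega
    · rw [if_neg he, if_neg he]
      simp

-- ===== VERDICT (by name: the statement is the Claim_ definition above) =====
theorem cutTail_py_spec : Claim_equal_cutTail_py := by
  intro xs _
  unfold Spec_cutTail_py cutTail_py cutTail_py_alt
  rw [pvGLPILoop_spec, pvBIdx_spec xs xs.length le_rfl]
  have htw : ((xs.reverse.takeWhile (·.isEmpty)).length) ≤ xs.length := by
    have h1 := (List.takeWhile_sublist (p := fun l : List Int => l.isEmpty)
      (l := xs.reverse)).length_le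
    simpa using h1
  simp only [List.take_length]
  by_cases hall : xs.reverse.all (·.isEmpty)
  · have hsame : xs.reverse.takeWhile (·.isEmpty) = xs.reverse :=
      List.takeWhile_eq_self_iff.mpr (List.all_eq_true.mp hall)
    rw [if_pos hall, hsame]
    simp
  · rw [if_neg hall]
    congr 1
    omega
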